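-- pv_equiv track=rewrite | github.com/m-tkach/adventofcode | 2022/08/2.py | get_distance_stats_dp
-- ===== SOURCE A (Python) =====
-- def is_in_grid(grid, x, y):
--     return len(grid) > y >= 0 <= x < len(grid[y])
--
-- def get_distance_stats_dp(grid, x, y, dx, dy, cache):
--     ck = (x, y, dx, dy)
--     if ck not in cache:
--         prev_y, prev_x = y + dy, x + dx
--         if is_in_grid(grid, prev_x, prev_y):
--             tree = grid[prev_y][prev_x]
--             dist_stats = [x + 1 for x in get_distance_stats_dp(grid, prev_x, prev_y, dx, dy, cache)]
--             dist_stats[tree] = 1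
--             cache[ck] = dist_stats
--         else:
--             cache[ck] = [0] * 10
--     return cache[ck]
-- ===== SOURCE B (Python) =====
-- def get_distance_stats_dp(grid, x, y, dx, dy, cache):
--     # Iterative two-phase version: walk the ray collecting cells on a stack,
--     # then build the per-height distance arrays back toward the start,
--     # writing the same cache entries A's recursion would.
--     stack = []
--     cx, cy = x, y
--     while (cx, cy, dx, dy) not in cache:
--         ny, nx = cy + dy, cx + dx
--         if not (0 <= ny < len(grid) and 0 <= nx < len(grid[ny])):
--             break
--         stack.append((cx, cy, grid[ny][nx]))
--         cx, cy = nx, ny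
--     if (cx, cy, dx, dy) in cache:
--         base = cache[(cx, cy, dx, dy)]
--     else:
--         base = [0] * 10
--         cache[(cx, cy, dx, dy)] = base
--     while stack:
--         px, py, tree = stack.pop()
--         base = [v + 1 for v in base]
--         base[tree] = 1
--         cache[(px, py, dx, dy)] = base
--     return base
-- ===== Notes on version B (the rewrite author's own statement) =====
-- stated objective: alternative
-- what changed: Replaced A's memoized top-down recursion with an explicit two-phase iteration: walk the ray pushing cells on a stack until the key is cached or the next cell leaves the grid, then pop the stack building each distance array from the previous one (no recursion, same cache writes in the same order).
import Mathlib
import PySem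

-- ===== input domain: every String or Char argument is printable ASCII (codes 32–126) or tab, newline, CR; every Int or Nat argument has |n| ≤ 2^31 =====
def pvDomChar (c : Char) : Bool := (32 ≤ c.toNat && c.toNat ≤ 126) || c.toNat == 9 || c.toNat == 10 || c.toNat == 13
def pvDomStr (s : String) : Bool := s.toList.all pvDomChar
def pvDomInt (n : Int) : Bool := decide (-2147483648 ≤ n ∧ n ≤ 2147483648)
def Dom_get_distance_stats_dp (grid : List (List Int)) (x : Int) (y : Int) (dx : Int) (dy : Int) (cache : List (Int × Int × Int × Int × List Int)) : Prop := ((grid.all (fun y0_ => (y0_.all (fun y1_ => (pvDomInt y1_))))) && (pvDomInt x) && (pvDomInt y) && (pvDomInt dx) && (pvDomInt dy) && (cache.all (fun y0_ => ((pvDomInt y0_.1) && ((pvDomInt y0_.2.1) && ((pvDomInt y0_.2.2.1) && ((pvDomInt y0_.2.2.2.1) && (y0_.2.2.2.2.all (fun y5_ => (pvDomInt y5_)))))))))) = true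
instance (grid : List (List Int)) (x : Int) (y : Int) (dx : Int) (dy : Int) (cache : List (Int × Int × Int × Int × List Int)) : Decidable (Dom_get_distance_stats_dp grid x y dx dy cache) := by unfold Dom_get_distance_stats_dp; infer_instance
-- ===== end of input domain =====

-- B replaces A's memoized recursion by an explicit stack walk + backward fold (iterative, no recursion);
-- equivalence is about the RETURN value only (both Pythons write the same cache entries, in the same order;
-- the Lean ports read the caller's cache and return the result).

-- ===== PORT A =====
-- first-match lookup of the dict key (x, y, dx, dy) in the association list (shared dict primitive)
def pvCacheGet (cache : List (Int × Int × Int × Int × List Int)) (x y dx dy : Int) : Option (List Int) :=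
  match cache with
  | [] => none
  | (a, b, c, d, v) :: rest =>
      if a = x ∧ b = y ∧ c = dx ∧ d = dy then some v else pvCacheGet rest x y dx dy

-- is_in_grid: Python's chained comparison len(grid) > y >= 0 <= x < len(grid[y]) (short-circuit keeps grid[y] safe)
def pvIsInGrid (grid : List (List Int)) (x y : Int) : Bool :=
  decide (y < (grid.length : Int)) && decide (0 ≤ y) && decide (0 ≤ x) &&
    decide (x < ((grid.getD y.toNat []).length : Int))

-- A's recursion, bounded by fuel (an upper bound on the straight-line walk; on admitted inputs it never
-- runs out).  A's cache writes are for keys the rest of ITS walk never reads back on admitted inputs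
-- (the walk is a straight line), so the port consults the caller's cache throughout.
def pvGoA (grid : List (List Int)) (dx dy : Int) (cache : List (Int × Int × Int × Int × List Int)) :
    Nat → Int → Int → List Int
  | 0, x, y =>
      (match pvCacheGet cache x y dx dy with
       | some v => v
       | none => List.replicate 10 0)
  | fuel + 1, x, y =>
      match pvCacheGet cache x y dx dy with
      | some v => v
      | none =>
          let prevY := y + dy
          let prevX := x + dx
          if pvIsInGrid grid prevX prevY then
            let tree := (grid.getD prevY.toNat []).getD prevX.toNat 0
            let distStats := (pvGoA grid dx dy cache fuel prevX prevY).map (· + 1)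
            PySem.List.pySetD distStats tree 1          -- dist_stats[tree] = 1
          else
            List.replicate 10 0                          -- [0] * 10

def get_distance_stats_dp (grid : List (List Int)) (x : Int) (y : Int) (dx : Int) (dy : Int) (cache : List (Int × Int × Int × Int × List Int)) : List Int :=
  pvGoA grid dx dy cache (grid.length + grid.foldl (fun m r => max m r.length) 0 + 2) x y

-- ===== PORT B =====
-- phase 1 of Source B: walk the ray from (x, y), pushing (cell, height of next cell) until the key is
-- cached or the next cell leaves the grid; returns (stack, stopping cell)
def pvWalkB (grid : List (List Int)) (dx dy : Int) (cache : List (Int × Int × Int × Int × List Int)) :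
    Nat → Int → Int → List (Int × Int × Int) → List (Int × Int × Int) × Int × Int
  | 0, cx, cy, st => (st, cx, cy)
  | fuel + 1, cx, cy, st =>
      if (pvCacheGet cache cx cy dx dy).isSome then (st, cx, cy)
      else
        let ny := cy + dy
        let nx := cx + dx
        if 0 ≤ ny ∧ ny < (grid.length : Int) ∧ 0 ≤ nx ∧ nx < ((grid.getD ny.toNat []).length : Int) then
          pvWalkB grid dx dy cache fuel nx ny ((cx, cy, (grid.getD ny.toNat []).getD nx.toNat 0) :: st)
        else (st, cx, cy)

-- phase 2 of Source B: base array at the stopping cell, then pop the stack building each array from the previous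
def get_distance_stats_dp_alt (grid : List (List Int)) (x : Int) (y : Int) (dx : Int) (dy : Int) (cache : List (Int × Int × Int × Int × List Int)) : List Int :=
  let r := pvWalkB grid dx dy cache (grid.length + grid.foldl (fun m r => max m r.length) 0 + 2) x y []
  let base :=
    match pvCacheGet cache r.2.1 r.2.2 dx dy with
    | some v => v
    | none => List.replicate 10 0
  r.1.foldl (fun b c => PySem.List.pySetD (b.map (· + 1)) c.2.2 1) base

-- ===== PRECONDITION & SPEC =====
-- A returns without touching any height exactly when the start key is cached or the next cell is outside
-- the grid (first two disjuncts); otherwise Pre_ restricts to the function's natural domain — tree heights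
-- 0–9 and 10-entry stat lists in the cache (outside it A generally raises IndexError on dist_stats[tree],
-- though it still returns on inputs whose walk never touches the bad height/list) — and excludes the
-- zero-step configuration dx = dy = 0, on which A recurses forever.  (The Lean ports are equal on all of
-- Dom, so the proof does not need Pre_; Pre_ marks where the Python A actually returns.)
def Pre_get_distance_stats_dp (grid : List (List Int)) (x : Int) (y : Int) (dx : Int) (dy : Int) (cache : List (Int × Int × Int × Int × List Int)) : Prop :=
  (∃ e ∈ cache, e.1 = x ∧ e.2.1 = y ∧ e.2.2.1 = dx ∧ e.2.2.2.1 = dy) ∨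
  ¬(0 ≤ y + dy ∧ y + dy < (grid.length : Int) ∧ 0 ≤ x + dx ∧
     x + dx < ((grid.getD (y + dy).toNat []).length : Int)) ∨
  ((∀ row ∈ grid, ∀ h ∈ row, 0 ≤ h ∧ h ≤ 9) ∧
   (∀ e ∈ cache, e.2.2.2.2.length = 10) ∧
   ¬(dx = 0 ∧ dy = 0))
instance (grid : List (List Int)) (x : Int) (y : Int) (dx : Int) (dy : Int) (cache : List (Int × Int × Int × Int × List Int)) : Decidable (Pre_get_distance_stats_dp grid x y dx dy cache) := by unfold Pre_get_distance_stats_dp; infer_instance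

def pvWitness_get_distance_stats_dp : List (List Int) × Int × Int × Int × Int × (List (Int × Int × Int × Int × List Int)) :=
  ([[1, 2], [3, 0]], 0, 0, 1, 0, [])

def Spec_get_distance_stats_dp (grid : List (List Int)) (x : Int) (y : Int) (dx : Int) (dy : Int) (cache : List (Int × Int × Int × Int × List Int)) (out : List Int) : Prop := out = get_distance_stats_dp_alt grid x y dx dy cache
instance (grid : List (List Int)) (x : Int) (y : Int) (dx : Int) (dy : Int) (cache : List (Int × Int × Int × Int × List Int)) (out : List Int) : Decidable (Spec_get_distance_stats_dp grid x y dx dy cache out) := by unfold Spec_get_distance_stats_dp; infer_instance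

-- ===== CLAIM (what is proved, stated in full; the proofs are below) =====
def Claim_equal_get_distance_stats_dp : Prop := ∀ (grid : List (List Int)) (x : Int) (y : Int) (dx : Int) (dy : Int) (cache : List (Int × Int × Int × Int × List Int)), Dom_get_distance_stats_dp grid x y dx dy cache → Pre_get_distance_stats_dp grid x y dx dy cache → Spec_get_distance_stats_dp grid x y dx dy cache (get_distance_stats_dp grid x y dx dy cache)

-- ===== LEMMAS AND PROOFS =====

-- the walk-then-fold of B with an arbitrary starting stack equals folding that stack over A's recursion
theorem pvWalk_fold_eq_goA (grid : List (List Int)) (dx dy : Int)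
    (cache : List (Int × Int × Int × Int × List Int)) :
    ∀ (fuel : Nat) (x y : Int) (st : List (Int × Int × Int)),
      (let r := pvWalkB grid dx dy cache fuel x y st
       r.1.foldl (fun b c => PySem.List.pySetD (b.map (· + 1)) c.2.2 1)
         (match pvCacheGet cache r.2.1 r.2.2 dx dy with
          | some v => v
          | none => List.replicate 10 0))
      = st.foldl (fun b c => PySem.List.pySetD (b.map (· + 1)) c.2.2 1)
          (pvGoA grid dx dy cache fuel x y) := by
  intro fuel
  induction fuel with
  | zero => intro x y st; simp [pvWalkB, pvGoA]
  | succ n ih =>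
      intro x y st
      simp only [pvWalkB, pvGoA]
      cases hc : pvCacheGet cache x y dx dy with
      | some v => simp [hc]
      | none =>
          simp only [Option.isSome_none, Bool.false_eq_true, if_false]
          by_cases hg : 0 ≤ y + dy ∧ y + dy < (grid.length : Int) ∧ 0 ≤ x + dx ∧
              x + dx < ((grid.getD (y + dy).toNat []).length : Int)
          · have hA : pvIsInGrid grid (x + dx) (y + dy) = true := by
              simp only [pvIsInGrid, Bool.and_eq_true, decide_eq_true_eq]
              exact ⟨⟨⟨hg.2.1, hg.1⟩, hg.2.2.1⟩, hg.2.2.2⟩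
            simp only [if_pos hg, hA, if_true]
            rw [ih]
            simp [List.foldl_cons]
          · have hA : pvIsInGrid grid (x + dx) (y + dy) = false := by
              simp only [pvIsInGrid, Bool.and_eq_false_iff]
              by_contra hcon
              push Not at hcon
              rcases hcon with ⟨⟨⟨h1, h2⟩, h3⟩, h4⟩
              exact hg ⟨by simpa using h2, by simpa using h1, by simpa using h3, by simpa using h4⟩
            simp only [hA, Bool.false_eq_true, if_false]
            rw [if_neg hg]
            simp [hc]

-- ===== VERDICT (by name: the statement is the Claim_ definition above) =====
theorem get_distance_stats_dp_spec : Claim_equal_get_distance_stats_dp := by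
  intro grid x y dx dy cache _ _
  unfold Spec_get_distance_stats_dp get_distance_stats_dp get_distance_stats_dp_alt
  rw [pvWalk_fold_eq_goA grid dx dy cache _ x y []]
  simp
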